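-- pv_equiv track=rewrite | github.com/pypi-data/pypi-mirror-266 | packages/uhw/uhw-0.0.1-py3-none-any.whl/uhw/parser.py | command_to_regex
-- ===== SOURCE A (Python) =====
-- def command_to_regex(command: str) -> str:
--     """
--     Return a regular expression string from the given command expression.
--     """
--
--     regex, low_zone = r"\:?", False
--     for c in command:
--         if not c.islower():
--             if low_zone:
--                 regex += ")?"
--             low_zone = False
--         if c == "[":
--             regex += "("
--         elif c == "]":
--             regex += ")?"
--         elif c.islower():
--             if not low_zone:
--                 regex += "("
--             low_zone = True
--             regex += c.upper()
--         elif c in "*:":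
--             regex += "\\" + c
--         else:
--             regex += c
--     if low_zone:
--         regex += ")?"
--     return regex + "$"
-- ===== SOURCE B (Python) =====
-- def command_to_regex(command: str) -> str:
--     """
--     Return a regular expression string from the given command expression.
--     """
--     parts = ["\\:?"]
--     i, n = 0, len(command)
--     while i < n:
--         if command[i].islower():
--             j = i
--             while j < n and command[j].islower():
--                 j += 1
--             parts.append("(" + command[i:j].upper() + ")?")
--             i = j
--         else:
--             c = command[i]
--             if c == "[":
--                 parts.append("(")
--             elif c == "]":
--                 parts.append(")?")
--             elif c in "*:":
--                 parts.append("\\" + c)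
--             else:
--                 parts.append(c)
--             i += 1
--     parts.append("$")
--     return "".join(parts)
-- ===== Notes on version B (the rewrite author's own statement) =====
-- stated objective: simpler
-- what changed: Replaced the character-by-character state machine with a low_zone flag by a stateless two-pointer scan: each maximal lowercase run is uppercased and wrapped in an optional group in one step, and other characters are translated directly.
import Mathlib
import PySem

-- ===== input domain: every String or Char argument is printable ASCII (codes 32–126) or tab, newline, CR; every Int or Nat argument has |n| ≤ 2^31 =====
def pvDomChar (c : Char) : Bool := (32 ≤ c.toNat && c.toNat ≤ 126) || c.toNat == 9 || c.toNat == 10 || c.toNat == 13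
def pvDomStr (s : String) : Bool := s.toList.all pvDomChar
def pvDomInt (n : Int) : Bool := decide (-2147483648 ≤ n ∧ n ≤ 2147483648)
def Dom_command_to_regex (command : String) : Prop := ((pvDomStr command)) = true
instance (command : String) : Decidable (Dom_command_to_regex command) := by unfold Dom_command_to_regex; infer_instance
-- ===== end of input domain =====

-- B replaces A's low_zone state machine by a stateless scan over maximal lowercase runs (objective: simpler).

-- Python str.islower on one character, exact on the printable-ASCII domain
def pyIsLowerChar (c : Char) : Bool := 'a' ≤ c && c ≤ 'z'
-- Python str.upper on one character, exact on the printable-ASCII domain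
def pyUpperChar (c : Char) : Char := if pyIsLowerChar c then Char.ofNat (c.toNat - 32) else c

-- ===== PORT A =====
-- state = (regex so far, low_zone)
def ctrStep (st : List Char × Bool) (c : Char) : List Char × Bool :=
  let regex := if !pyIsLowerChar c && st.2 then st.1 ++ [')', '?'] else st.1
  let low := if !pyIsLowerChar c then false else st.2
  if c = '[' then (regex ++ ['('], low)
  else if c = ']' then (regex ++ [')', '?'], low)
  else if pyIsLowerChar c then
    ((if !low then regex ++ ['('] else regex) ++ [pyUpperChar c], true)
  else if c = '*' || c = ':' then (regex ++ ['\\', c], low)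
  else (regex ++ [c], low)

def command_to_regex (command : String) : String :=
  let st := command.toList.foldl ctrStep (['\\', ':', '?'], false)
  String.mk ((if st.2 then st.1 ++ [')', '?'] else st.1) ++ ['$'])

-- ===== PORT B =====
-- translation of a single non-lowercase character
def ctrEmit (c : Char) : List Char :=
  if c = '[' then ['(']
  else if c = ']' then [')', '?']
  else if c = '*' || c = ':' then ['\\', c]
  else [c]

-- run-based scan: a maximal lowercase run becomes '(RUN)?' in one step
def ctrRuns : List Char → List Char
  | [] => ['$']
  | c :: rest =>
    if pyIsLowerChar c then
      ['('] ++ (c :: rest.takeWhile pyIsLowerChar).map pyUpperChar ++ [')', '?']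
        ++ ctrRuns (rest.dropWhile pyIsLowerChar)
    else
      ctrEmit c ++ ctrRuns rest
termination_by l => l.length
decreasing_by
  · simp only [List.length_cons]
    exact Nat.lt_succ_of_le (List.length_dropWhile_le _ _)
  · simp

def command_to_regex_alt (command : String) : String :=
  String.mk (['\\', ':', '?'] ++ ctrRuns command.toList)

-- ===== PRECONDITION & SPEC =====
def Spec_command_to_regex (command : String) (out : String) : Prop := out = command_to_regex_alt command
instance (command : String) (out : String) : Decidable (Spec_command_to_regex command out) := by unfold Spec_command_to_regex; infer_instance

-- ===== CLAIM (what is proved, stated in full; the proofs are below) =====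
def Claim_equal_command_to_regex : Prop := ∀ (command : String), Dom_command_to_regex command → Spec_command_to_regex command (command_to_regex command)

-- ===== LEMMAS AND PROOFS =====

-- A's finalization step
def ctrFin (st : List Char × Bool) : List Char :=
  (if st.2 then st.1 ++ [')', '?'] else st.1) ++ ['$']

theorem ctrStep_low (c : Char) (hl : pyIsLowerChar c = true) (acc : List Char) (b : Bool) :
    ctrStep (acc, b) c = ((if b then acc else acc ++ ['(']) ++ [pyUpperChar c], true) := by
  have h1 : c ≠ '[' := by rintro rfl; simp [pyIsLowerChar] at hl
  have h2 : c ≠ ']' := by rintro rfl; simp [pyIsLowerChar] at hl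
  cases b <;> simp [ctrStep, hl, h1, h2]

theorem ctrStep_high (c : Char) (hl : pyIsLowerChar c = false) (acc : List Char) (b : Bool) :
    ctrStep (acc, b) c = ((if b then acc ++ [')', '?'] else acc) ++ ctrEmit c, false) := by
  cases b <;> simp only [ctrStep, ctrEmit, hl] <;> split_ifs <;> simp_all

-- joint invariant: A's loop from low_zone = false produces acc ++ ctrRuns l; from
-- low_zone = true it first finishes the current run lazily, matching B's run scan.
theorem ctr_invariant (l : List Char) :
    (∀ acc : List Char, ctrFin (l.foldl ctrStep (acc, false)) = acc ++ ctrRuns l) ∧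
    (∀ acc : List Char, ctrFin (l.foldl ctrStep (acc, true)) =
      acc ++ (l.takeWhile pyIsLowerChar).map pyUpperChar ++ [')', '?']
          ++ ctrRuns (l.dropWhile pyIsLowerChar)) := by
  induction l with
  | nil => constructor <;> intro acc <;> simp [ctrFin, ctrRuns]
  | cons c rest ih =>
    obtain ⟨ihF, ihT⟩ := ih
    constructor <;> intro acc <;> by_cases hl : pyIsLowerChar c = true
    · rw [List.foldl_cons, ctrStep_low c hl, if_neg (by simp), ihT, ctrRuns]
      simp [hl]
    · rw [List.foldl_cons, ctrStep_high c (by simpa using hl), if_neg (by simp), ihF, ctrRuns]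
      simp [hl]
    · rw [List.foldl_cons, ctrStep_low c hl, if_pos rfl, ihT,
        List.takeWhile_cons_of_pos hl, List.dropWhile_cons_of_pos hl]
      simp
    · rw [List.foldl_cons, ctrStep_high c (by simpa using hl), if_pos rfl, ihF,
        List.takeWhile_cons_of_neg (by simpa using hl), List.dropWhile_cons_of_neg (by simpa using hl),
        ctrRuns]
      simp [hl]

-- ===== VERDICT (by name: the statement is the Claim_ definition above) =====
theorem command_to_regex_spec : Claim_equal_command_to_regex := by
  intro command _
  show String.mk (ctrFin (command.toList.foldl ctrStep (['\\', ':', '?'], false))) =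
    command_to_regex_alt command
  rw [(ctr_invariant command.toList).1]
  rfl
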